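-- pv_equiv track=rewrite | github.com/kaetosh/Flat_table_account_analysis_ver_1.0 | processing/F_lines_delete.py | accounting_code_without_subaccount
-- ===== SOURCE A (Python) =====
-- def accounting_code_without_subaccount(accounting_codes):
--     accounting_codes_xx = [i[:2] for i in accounting_codes]
--     count_dict = {}
--     for item in accounting_codes_xx:
--         if item in count_dict:
--             count_dict[item] += 1
--         else:
--             count_dict[item] = 1
--     result = [key for key, value in count_dict.items() if value == 1]
--     result.append('00')
--     result.append('000')
--     return result
-- ===== SOURCE B (Python) =====
-- def accounting_code_without_subaccount(accounting_codes):
--     prefixes = [i[:2] for i in accounting_codes]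
--     result = []
--     for j, p in enumerate(prefixes):
--         if p not in prefixes[:j] and p not in prefixes[j + 1:]:
--             result.append(p)
--     result.append('00')
--     result.append('000')
--     return result
-- ===== Notes on version B (the rewrite author's own statement) =====
-- stated objective: alternative
-- what changed: Replaces A's counting dict plus a scan over dict items with an index-based brute-force scan: an element is kept iff its prefix occurs neither before nor after its own position (no auxiliary counting structure at all).
import Mathlib
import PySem

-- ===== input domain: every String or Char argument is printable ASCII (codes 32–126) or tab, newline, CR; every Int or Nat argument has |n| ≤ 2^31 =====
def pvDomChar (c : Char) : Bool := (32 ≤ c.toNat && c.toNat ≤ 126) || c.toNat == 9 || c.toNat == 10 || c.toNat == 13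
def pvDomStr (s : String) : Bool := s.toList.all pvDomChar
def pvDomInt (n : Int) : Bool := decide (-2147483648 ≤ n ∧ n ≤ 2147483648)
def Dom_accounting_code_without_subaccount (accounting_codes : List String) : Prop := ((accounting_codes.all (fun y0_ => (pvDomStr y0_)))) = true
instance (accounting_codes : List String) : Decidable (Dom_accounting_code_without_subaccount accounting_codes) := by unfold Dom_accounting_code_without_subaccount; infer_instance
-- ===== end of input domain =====

-- B drops A's counting dict entirely: an index-based brute-force scan keeps a prefix iff it
-- occurs neither before nor after its own position (objective: alternative; B does more work on large inputs).

-- ===== PORT A =====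
def accounting_code_without_subaccount (accounting_codes : List String) : List String :=
  let accounting_codes_xx := accounting_codes.map (fun i => PySem.Str.slice i none (some 2))
  let count_dict : PySem.Dict String Int :=
    accounting_codes_xx.foldl
      (fun d item =>
        if d.contains item then d.insert item (d.getD item 0 + 1)
        else d.insert item 1)
      PySem.Dict.empty
  let result := (count_dict.items.filter (fun kv => kv.2 == 1)).map (fun kv => kv.1)
  (result ++ ["00"]) ++ ["000"]

-- ===== PORT B =====
def accounting_code_without_subaccount_alt (accounting_codes : List String) : List String :=
  let prefixes := accounting_codes.map (fun i => PySem.Str.slice i none (some 2))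
  let result := (PySem.List.enumerate prefixes 0).foldl
    (fun acc jp =>
      if !(PySem.List.slice prefixes none (some jp.1)).contains jp.2 &&
         !(PySem.List.slice prefixes (some (jp.1 + 1)) none).contains jp.2
      then acc ++ [jp.2] else acc) []
  (result ++ ["00"]) ++ ["000"]

-- ===== PRECONDITION & SPEC =====
def Spec_accounting_code_without_subaccount (accounting_codes : List String) (out : List String) : Prop := out = accounting_code_without_subaccount_alt accounting_codes
instance (accounting_codes : List String) (out : List String) : Decidable (Spec_accounting_code_without_subaccount accounting_codes out) := by unfold Spec_accounting_code_without_subaccount; infer_instance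

-- ===== CLAIM (what is proved, stated in full; the proofs are below) =====
def Claim_equal_accounting_code_without_subaccount : Prop := ∀ (accounting_codes : List String), Dom_accounting_code_without_subaccount accounting_codes → Spec_accounting_code_without_subaccount accounting_codes (accounting_code_without_subaccount accounting_codes)

-- ===== LEMMAS AND PROOFS =====

-- A's branchy counting step is exactly Dict.modify _ 0 (+1), so A's dict is Dict.counter.
theorem pvA_step_eq_modify (d : PySem.Dict String Int) (item : String) :
    (if d.contains item then d.insert item (d.getD item 0 + 1) else d.insert item 1)
      = d.modify item 0 (fun x => x + 1) := by
  by_cases h : d.contains item = true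
  · simp [h, PySem.Dict.modify]
  · simp [Bool.not_eq_true] at h
    simp [h, PySem.Dict.modify, PySem.Dict.getD_of_not_contains d 0 h]

theorem pvA_dict_eq_counter (xs : List String) :
    xs.foldl
      (fun d item =>
        if d.contains item then d.insert item (d.getD item 0 + 1)
        else d.insert item 1)
      PySem.Dict.empty = PySem.Dict.counter xs := by
  have key : ∀ (l : List String) (d : PySem.Dict String Int),
      l.foldl (fun d item =>
        if d.contains item then d.insert item (d.getD item 0 + 1)
        else d.insert item 1) d
        = l.foldl (fun d x => d.modify x 0 (fun x => x + 1)) d := by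
    intro l
    induction l with
    | nil => intro d; rfl
    | cons x t ih =>
      intro d
      rw [List.foldl_cons, List.foldl_cons, pvA_step_eq_modify]
      exact ih _
  rw [key]; rfl

-- filtering a once-only predicate through the ordered dedup changes nothing
theorem pvFilter_ofList (q : String → Bool) :
    ∀ xs : List String, (∀ a, q a = true → xs.count a ≤ 1) →
      (PySem.Set.ofList xs).filter q = xs.filter q := by
  intro xs
  induction xs using List.reverseRecOn with
  | nil => intro _; simp [PySem.Set.ofList_nil]
  | append_singleton t x ih =>
    intro h
    have ht : ∀ a, q a = true → t.count a ≤ 1 := by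
      intro a ha
      have h1 := h a ha
      have h2 : t.count a ≤ (t ++ [x]).count a := by simp [List.count_append]
      omega
    rw [PySem.Set.ofList_append_singleton]
    by_cases hx : x ∈ t
    · have hq : q x = false := by
        rw [Bool.eq_false_iff]
        intro hqx
        have h1 := h x hqx
        have h2 : 1 ≤ t.count x := List.one_le_count_iff.mpr hx
        simp [List.count_append] at h1
        omega
      have hxs : x ∈ PySem.Set.ofList t := (PySem.Set.mem_ofList t x).mpr hx
      rw [PySem.Set.add_of_mem hxs, ih ht, List.filter_append]
      simp [hq]
    · have hxs : x ∉ PySem.Set.ofList t := fun hc => hx ((PySem.Set.mem_ofList t x).mp hc)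
      rw [PySem.Set.add_of_not_mem hxs, List.filter_append, List.filter_append, ih ht]

-- A's result list equals the canonical "prefixes occurring exactly once" filter
theorem pvA_result (xx : List String) :
    (((PySem.Dict.counter xx).items.filter (fun kv => kv.2 == 1)).map (fun kv => kv.1))
      = xx.filter (fun p => xx.count p == 1) := by
  rw [PySem.Dict.items_counter, List.filter_map, List.map_map]
  have hpred : ((fun kv : String × Int => kv.2 == 1) ∘ fun k => (k, (List.count k xx : Int)))
      = fun p => xx.count p == 1 := by
    funext p
    show ((List.count p xx : Int) == 1) = (List.count p xx == 1)
    simp [Nat.cast_eq_one]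
  rw [hpred]
  have hcomp : ((fun kv : String × Int => kv.1) ∘ fun k => (k, (List.count k xx : Int))) = id := by
    funext p; rfl
  rw [hcomp, List.map_id]
  refine pvFilter_ofList _ xx ?_
  intro a ha
  simp only [beq_iff_eq] at ha
  omega

-- filter by an index-independent test on the value, through enumerate
theorem pvFilter_enum (q : String → Bool) :
    ∀ (l : List String) (s : Int),
      ((PySem.List.enumerate l s).filter (fun jp => q jp.2)).map (fun jp => jp.2)
        = l.filter q := by
  intro l
  induction l with
  | nil => intro s; simp [PySem.List.enumerate_nil]
  | cons x t ih =>
    intro s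
    rw [PySem.List.enumerate_cons]
    by_cases hx : q x = true
    · simp [hx, ih]
    · simp only [Bool.not_eq_true] at hx
      simp [hx, ih]

-- B's per-index test "not before and not after" is exactly "occurs once overall"
theorem pvB_pred (xx : List String) (jp : Int × String)
    (hjp : jp ∈ PySem.List.enumerate xx 0) :
    (!(PySem.List.slice xx none (some jp.1)).contains jp.2 &&
     !(PySem.List.slice xx (some (jp.1 + 1)) none).contains jp.2)
      = (xx.count jp.2 == 1) := by
  rw [PySem.List.mem_enumerate_iff] at hjp
  obtain ⟨k, hk, rfl⟩ := hjp
  simp only [zero_add]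
  rw [PySem.List.slice_to_natCast]
  have h1 : ((k : Int) + 1) = ((k + 1 : Nat) : Int) := by push_cast; ring
  rw [h1, PySem.List.slice_from_natCast]
  have hsplit : xx.drop k = xx[k] :: xx.drop (k + 1) := List.drop_eq_getElem_cons hk
  have hcnt : xx.count xx[k]
      = (xx.take k).count xx[k] + (1 + (xx.drop (k+1)).count xx[k]) := by
    have h := congrArg (fun l => List.count xx[k] l) (List.take_append_drop k xx).symm
    simp only at h
    rw [h, List.count_append, hsplit, List.count_cons_self]
    omega
  have hc1 : (xx.take k).contains xx[k] = decide (1 ≤ (xx.take k).count xx[k]) := by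
    rw [Bool.eq_iff_iff]
    simp [List.one_le_count_iff]
  have hc2 : (xx.drop (k+1)).contains xx[k] = decide (1 ≤ (xx.drop (k+1)).count xx[k]) := by
    rw [Bool.eq_iff_iff]
    simp [List.one_le_count_iff]
  rw [hc1, hc2]
  by_cases hb : (xx.take k).count xx[k] = 0 ∧ (xx.drop (k+1)).count xx[k] = 0
  · have : xx.count xx[k] = 1 := by omega
    simp [hb.1, hb.2, this]
  · have : xx.count xx[k] ≠ 1 := by omega
    rcases Nat.eq_zero_or_pos ((xx.take k).count xx[k]) with h0 | h0
    · have h2 : 1 ≤ (xx.drop (k+1)).count xx[k] := by omega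
      simp [h0, h2, this]
    · simp [Nat.one_le_iff_ne_zero.mpr (by omega : (xx.take k).count xx[k] ≠ 0), this]

-- B's result list equals the same canonical filter
theorem pvB_result (xx : List String) :
    (PySem.List.enumerate xx 0).foldl
      (fun acc jp =>
        if !(PySem.List.slice xx none (some jp.1)).contains jp.2 &&
           !(PySem.List.slice xx (some (jp.1 + 1)) none).contains jp.2
        then acc ++ [jp.2] else acc) []
      = xx.filter (fun p => xx.count p == 1) := by
  rw [PySem.List.foldl_append_if
    (fun jp : Int × String =>
      !(PySem.List.slice xx none (some jp.1)).contains jp.2 &&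
      !(PySem.List.slice xx (some (jp.1 + 1)) none).contains jp.2)
    (fun jp => jp.2)]
  rw [List.nil_append]
  rw [List.filter_congr (fun jp hjp => pvB_pred xx jp hjp)]
  exact pvFilter_enum (fun p => xx.count p == 1) xx 0

-- ===== VERDICT (by name: the statement is the Claim_ definition above) =====
theorem accounting_code_without_subaccount_spec : Claim_equal_accounting_code_without_subaccount := by
  intro accounting_codes _
  unfold Spec_accounting_code_without_subaccount
  unfold accounting_code_without_subaccount accounting_code_without_subaccount_alt
  simp only [pvA_dict_eq_counter, pvA_result, pvB_result]
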